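-- pv_equiv track=rewrite | github.com/Indspl0it/RTOSploit | rtosploit/peripherals/auto_config.py | resolve_qemu_machine
-- ===== SOURCE A (Python) =====
-- _MCU_TO_MACHINE: dict[str, str] = {
--     "stm32f1": "stm32vldiscovery",
--     "stm32f2": "netduino2",
--     "stm32f4": "netduino2",
--     "stm32l4": "b-l475e-iot01a",
--     "nrf51": "microbit",
--     "nrf52": "microbit",
--     "nrf52832": "microbit",
--     "nrf52840": "microbit",
--     "lm3s": "lm3s6965evb",
--     "mps2": "mps2-an385",
--     "rp2040": "mps2-an385",  # fallback, no native support
--     "sam": "mps2-an385",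
--     "esp32": "mps2-an385",  # fallback
-- }
--
-- _ARCH_FALLBACK_MACHINE: dict[str, str] = {
--     "armv7m": "mps2-an385",
--     "armv8m": "mps2-an505",
--     "riscv32": "sifive_e",
-- }
--
-- def resolve_qemu_machine(mcu_family: str, architecture: str = "armv7m") -> str:
--     """Resolve QEMU machine name from MCU family, with architecture fallback."""
--     key = mcu_family.lower()
--     machine = _MCU_TO_MACHINE.get(key)
--     if machine is not None:
--         return machine
--
--     # Try prefix match: "stm32f407" -> "stm32f4"
--     for prefix in sorted(_MCU_TO_MACHINE.keys(), key=len, reverse=True):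
--         if key.startswith(prefix):
--             return _MCU_TO_MACHINE[prefix]
--
--     # Architecture fallback
--     arch_key = architecture.lower()
--     return _ARCH_FALLBACK_MACHINE.get(arch_key, "mps2-an385")
-- ===== SOURCE B (Python) =====
-- _MCU_TO_MACHINE: dict[str, str] = {
--     "stm32f1": "stm32vldiscovery",
--     "stm32f2": "netduino2",
--     "stm32f4": "netduino2",
--     "stm32l4": "b-l475e-iot01a",
--     "nrf51": "microbit",
--     "nrf52": "microbit",
--     "nrf52832": "microbit",
--     "nrf52840": "microbit",
--     "lm3s": "lm3s6965evb",
--     "mps2": "mps2-an385",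
--     "rp2040": "mps2-an385",
--     "sam": "mps2-an385",
--     "esp32": "mps2-an385",
-- }
--
-- _ARCH_FALLBACK_MACHINE: dict[str, str] = {
--     "armv7m": "mps2-an385",
--     "armv8m": "mps2-an505",
--     "riscv32": "sifive_e",
-- }
--
-- _MCU_MAX = max(len(k) for k in _MCU_TO_MACHINE)
--
--
-- def resolve_qemu_machine(mcu_family: str, architecture: str = "armv7m") -> str:
--     """Resolve QEMU machine name: longest dict key that is a prefix of the
--     lowered MCU family (the exact match is the l == len(key) case), else the
--     architecture fallback."""
--     key = mcu_family.lower()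
--     for l in range(min(len(key), _MCU_MAX), 0, -1):
--         machine = _MCU_TO_MACHINE.get(key[:l])
--         if machine is not None:
--             return machine
--     return _ARCH_FALLBACK_MACHINE.get(architecture.lower(), "mps2-an385")
-- ===== Notes on version B (the rewrite author's own statement) =====
-- stated objective: simpler
-- what changed: Replaced the exact-match lookup plus a longest-first scan over sorted(dict keys, key=len, reverse=True) with startswith tests by a single descending loop over prefixes key[:l] of the query (l from min(len(key), max key length) down to 1) probed directly in the dict; the exact match is absorbed as the l == len(key) case and the sort disappears.
import Mathlib
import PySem

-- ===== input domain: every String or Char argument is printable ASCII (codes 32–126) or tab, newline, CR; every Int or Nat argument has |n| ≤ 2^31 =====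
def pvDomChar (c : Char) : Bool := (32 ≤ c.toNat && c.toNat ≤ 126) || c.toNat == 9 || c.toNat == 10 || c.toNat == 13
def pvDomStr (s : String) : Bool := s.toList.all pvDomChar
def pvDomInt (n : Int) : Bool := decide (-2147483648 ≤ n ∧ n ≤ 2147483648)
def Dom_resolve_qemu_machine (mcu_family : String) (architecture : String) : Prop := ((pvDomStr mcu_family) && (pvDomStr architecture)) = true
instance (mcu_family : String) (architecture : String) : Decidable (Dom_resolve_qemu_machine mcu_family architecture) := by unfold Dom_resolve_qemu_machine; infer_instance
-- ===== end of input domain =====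

-- B replaces A's sort-the-keys-then-startswith scan by a single descending loop over
-- prefixes key[:l] of the query, probed directly in the dict (simpler; no sort, no exact-match special case).

-- ===== PORT A =====
-- module constants (dict keys kept as List Char; string facts are proved on the list side)
def pvMcu : PySem.Dict (List Char) String := PySem.Dict.ofList [
  ("stm32f1".toList, "stm32vldiscovery"),
  ("stm32f2".toList, "netduino2"),
  ("stm32f4".toList, "netduino2"),
  ("stm32l4".toList, "b-l475e-iot01a"),
  ("nrf51".toList, "microbit"),
  ("nrf52".toList, "microbit"),
  ("nrf52832".toList, "microbit"),
  ("nrf52840".toList, "microbit"),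
  ("lm3s".toList, "lm3s6965evb"),
  ("mps2".toList, "mps2-an385"),
  ("rp2040".toList, "mps2-an385"),
  ("sam".toList, "mps2-an385"),
  ("esp32".toList, "mps2-an385")]

def pvArch : PySem.Dict (List Char) String := PySem.Dict.ofList [
  ("armv7m".toList, "mps2-an385"),
  ("armv8m".toList, "mps2-an505"),
  ("riscv32".toList, "sifive_e")]

-- A's 'for prefix in …: if key.startswith(prefix): return _MCU_TO_MACHINE[prefix]'
-- (the returned lookup is get?; it is some _ whenever the loop fires, since prefix ∈ keys)
def pvFindPrefix (key : List Char) : List (List Char) → Option String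
  | [] => none
  | p :: ps => if PySem.Chars.startswith key p then pvMcu.get? p else pvFindPrefix key ps

def resolve_qemu_machine (mcu_family : String) (architecture : String) : String :=
  let key := PySem.Chars.lower mcu_family.toList
  match pvMcu.get? key with
  | some machine => machine
  | none =>
    match pvFindPrefix key (PySem.List.sorted pvMcu.keys (fun p => (p.length : Int)) true) with
    | some machine => machine
    | none => pvArch.getD (PySem.Chars.lower architecture.toList) "mps2-an385"

-- ===== PORT B =====
-- _MCU_MAX = max(len(k) for k in _MCU_TO_MACHINE)  (foldl over the key lengths; exact: all lengths ≥ 0)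
def pvMcuMax : Nat := (pvMcu.keys.map List.length).foldl Nat.max 0

-- 'for l in range(min(len(key), _MCU_MAX), 0, -1): …' counting down; key[:l] = take l (l ≥ 0)
def pvScan (key : List Char) : Nat → Option String
  | 0 => none
  | l + 1 =>
    match pvMcu.get? (key.take (l + 1)) with
    | some machine => some machine
    | none => pvScan key l

def resolve_qemu_machine_alt (mcu_family : String) (architecture : String) : String :=
  let key := PySem.Chars.lower mcu_family.toList
  match pvScan key (Nat.min key.length pvMcuMax) with
  | some machine => machine
  | none => pvArch.getD (PySem.Chars.lower architecture.toList) "mps2-an385"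

-- ===== PRECONDITION & SPEC =====
def Spec_resolve_qemu_machine (mcu_family : String) (architecture : String) (out : String) : Prop := out = resolve_qemu_machine_alt mcu_family architecture
instance (mcu_family : String) (architecture : String) (out : String) : Decidable (Spec_resolve_qemu_machine mcu_family architecture out) := by unfold Spec_resolve_qemu_machine; infer_instance

-- ===== CLAIM (what is proved, stated in full; the proofs are below) =====
def Claim_equal_resolve_qemu_machine : Prop := ∀ (mcu_family : String) (architecture : String), Dom_resolve_qemu_machine mcu_family architecture → Spec_resolve_qemu_machine mcu_family architecture (resolve_qemu_machine mcu_family architecture)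

-- ===== LEMMAS AND PROOFS =====

-- concrete facts about the literal dict, by decide
lemma pv_same_val : ∀ p ∈ pvMcu.keys, ∀ q ∈ pvMcu.keys, p <+: q → pvMcu.get? p = pvMcu.get? q := by decide

lemma pv_nil_not_key : ([] : List Char) ∉ pvMcu.keys := by decide

lemma pv_len_le_max : ∀ p ∈ pvMcu.keys, p.length ≤ pvMcuMax := by decide

-- any two dict keys that are prefixes of the same K carry the same value
lemma pv_same_val_of_prefix {K p q : List Char} (hp : p ∈ pvMcu.keys) (hq : q ∈ pvMcu.keys)
    (hpK : p <+: K) (hqK : q <+: K) : pvMcu.get? p = pvMcu.get? q := by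
  rcases Nat.le_total p.length q.length with h | h
  · exact pv_same_val p hp q hq (List.prefix_of_prefix_length_le hpK hqK h)
  · exact (pv_same_val q hq p hp (List.prefix_of_prefix_length_le hqK hpK h)).symm

lemma pv_mem_keys_of_get? {p : List Char} {v : String} (h : pvMcu.get? p = some v) :
    p ∈ pvMcu.keys :=
  PySem.Dict.mem_keys_of_mem_items _ (PySem.Dict.mem_items_of_get?_eq_some _ h)

-- A's loop returns get? p₀ for any matching key p₀, provided all scanned entries are keys
lemma pv_find_some {K p₀ : List Char} (h₀ : p₀ ∈ pvMcu.keys) (hp : p₀ <+: K) :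
    ∀ ks : List (List Char), (∀ p ∈ ks, p ∈ pvMcu.keys) → p₀ ∈ ks →
      pvFindPrefix K ks = pvMcu.get? p₀ := by
  intro ks
  induction ks with
  | nil => intro _ h; cases h
  | cons p ps ih =>
    intro hall hin
    by_cases hsp : PySem.Chars.startswith K p = true
    · simp only [pvFindPrefix, hsp, if_true]
      exact pv_same_val_of_prefix (hall p (by simp)) h₀ ((PySem.Chars.startswith_iff _ _).mp hsp) hp
    · simp only [pvFindPrefix, hsp, if_false, Bool.false_eq_true]
      have hne : p₀ ≠ p := by
        rintro rfl; exact hsp ((PySem.Chars.startswith_iff _ _).mpr hp)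
      exact ih (fun q hq => hall q (by simp [hq])) (by
        rcases List.mem_cons.mp hin with h | h
        · exact absurd h hne
        · exact h)

lemma pv_find_none {K : List Char} :
    ∀ ks : List (List Char), (∀ p ∈ ks, ¬ p <+: K) → pvFindPrefix K ks = none := by
  intro ks
  induction ks with
  | nil => intro _; rfl
  | cons p ps ih =>
    intro hall
    have hsp : PySem.Chars.startswith K p ≠ true := fun h =>
      hall p (by simp) ((PySem.Chars.startswith_iff _ _).mp h)
    simp only [pvFindPrefix, hsp, if_false, Bool.false_eq_true]
    exact ih fun q hq => hall q (by simp [hq])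

-- B's loop returns get? p₀ for any matching key p₀ of length ≤ m, m ≤ |K|
lemma pv_scan_some {K p₀ : List Char} (h₀ : p₀ ∈ pvMcu.keys) (hp : p₀ <+: K) :
    ∀ m : Nat, p₀.length ≤ m → m ≤ K.length → pvScan K m = pvMcu.get? p₀ := by
  intro m
  induction m with
  | zero =>
    intro hlen _
    have : p₀ = [] := List.eq_nil_of_length_eq_zero (Nat.le_zero.mp hlen)
    exact absurd (this ▸ h₀) pv_nil_not_key
  | succ m ih =>
    intro hlen hmK
    cases hget : pvMcu.get? (K.take (m + 1)) with
    | some v =>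
      simp only [pvScan, hget]
      rw [← hget]
      exact pv_same_val_of_prefix (pv_mem_keys_of_get? hget) h₀ (List.take_prefix _ _) hp
    | none =>
      simp only [pvScan, hget]
      have hlt : p₀.length ≤ m := by
        rcases Nat.lt_or_ge p₀.length (m + 1) with h | h
        · omega
        · exfalso
          have heq : p₀ = K.take (m + 1) := by
            have := List.prefix_iff_eq_take.mp hp
            rw [this]
            congr 1
            omega
          rw [← heq] at hget
          exact ((PySem.Dict.get?_eq_none_iff_not_mem_keys _ _).mp hget) h₀
      exact ih hlt (by omega)

lemma pv_scan_none {K : List Char} (h : ∀ p ∈ pvMcu.keys, ¬ p <+: K) :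
    ∀ m : Nat, m ≤ K.length → pvScan K m = none := by
  intro m
  induction m with
  | zero => intro _; rfl
  | succ m ih =>
    intro hmK
    cases hget : pvMcu.get? (K.take (m + 1)) with
    | some v =>
      exact absurd (List.take_prefix _ _) (h _ (pv_mem_keys_of_get? hget))
    | none =>
      simp only [pvScan, hget]
      exact ih (by omega)

-- ===== VERDICT (by name: the statement is the Claim_ definition above) =====
theorem resolve_qemu_machine_spec : Claim_equal_resolve_qemu_machine := by
  intro mcu_family architecture _
  show _ = _
  unfold resolve_qemu_machine resolve_qemu_machine_alt
  set K := PySem.Chars.lower mcu_family.toList with hK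
  by_cases hE : ∃ p ∈ pvMcu.keys, p <+: K
  · obtain ⟨p₀, h₀, hp⟩ := hE
    have hlen₀ : p₀.length ≤ Nat.min K.length pvMcuMax :=
      Nat.le_min.mpr ⟨hp.length_le, pv_len_le_max p₀ h₀⟩
    have hscan : pvScan K (Nat.min K.length pvMcuMax) = pvMcu.get? p₀ :=
      pv_scan_some h₀ hp _ hlen₀ (Nat.min_le_left _ _)
    cases hx : pvMcu.get? K with
    | some v =>
      have hKmem : K ∈ pvMcu.keys := pv_mem_keys_of_get? hx
      have : pvMcu.get? p₀ = pvMcu.get? K :=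
        pv_same_val_of_prefix h₀ hKmem hp (List.prefix_refl K)
      simp only [hx, hscan, this]
    | none =>
      have hfind : pvFindPrefix K (PySem.List.sorted pvMcu.keys (fun p => (p.length : Int)) true)
          = pvMcu.get? p₀ :=
        pv_find_some h₀ hp _ (fun p hpmem => (PySem.List.mem_sorted _ _ _ _).mp hpmem)
          ((PySem.List.mem_sorted _ _ _ _).mpr h₀)
      cases hv : pvMcu.get? p₀ with
      | some v => simp only [hx, hfind, hscan, hv]
      | none => exact absurd h₀ ((PySem.Dict.get?_eq_none_iff_not_mem_keys _ _).mp hv)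
  · push Not at hE
    have hx : pvMcu.get? K = none := by
      cases hget : pvMcu.get? K with
      | some v => exact absurd (List.prefix_refl K) (hE K (pv_mem_keys_of_get? hget))
      | none => rfl
    have hfind : pvFindPrefix K (PySem.List.sorted pvMcu.keys (fun p => (p.length : Int)) true)
        = none :=
      pv_find_none _ (fun p hpmem => hE p ((PySem.List.mem_sorted _ _ _ _).mp hpmem))
    have hscan : pvScan K (Nat.min K.length pvMcuMax) = none :=
      pv_scan_none hE _ (Nat.min_le_left _ _)
    simp only [hx, hfind, hscan]
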